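-- pv_equiv track=rewrite | github.com/ak0586/amazon_scrapper | Social_Media_Poster_with_Local_Amazon_Scraper.py | enhance_image_quality
-- ===== SOURCE A (Python) =====
-- def enhance_image_quality(image_url: str) -> str:
--     """Enhance image quality by modifying Amazon image URL parameters"""
--     if not image_url:
--         return image_url
--
--     enhanced_url = image_url
--
--     replacements = [
--         ('._AC_UY218_', '._AC_UY1000_'),
--         ('._AC_UX218_', '._AC_UX1000_'),
--         ('._AC_UY200_', '._AC_UY1000_'),
--         ('._AC_UX200_', '._AC_UX1000_'),
--         ('._AC_UY400_', '._AC_UY1000_'),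
--         ('._AC_UX400_', '._AC_UX1000_'),
--         ('._AC_UY500_', '._AC_UY1000_'),
--         ('._AC_UX500_', '._AC_UX1000_'),
--         ('._SY160_', '._SY1000_'),
--         ('._SX160_', '._SX1000_'),
--         ('._SY200_', '._SY1000_'),
--         ('._SX200_', '._SX1000_'),
--         ('._SY300_', '._SY1000_'),
--         ('._SX300_', '._SX1000_'),
--         ('._SY400_', '._SY1000_'),
--         ('._SX400_', '._SX1000_'),
--         ('._SY500_', '._SY1000_'),
--         ('._SX500_', '._SX1000_'),
--         ('._AC_SY200_', '._AC_SY1000_'),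
--         ('._AC_SX200_', '._AC_SX1000_'),
--         ('._AC_SY400_', '._AC_SY1000_'),
--         ('._AC_SX400_', '._AC_SX1000_'),
--         ('._AC_SY500_', '._AC_SY1000_'),
--         ('._AC_SX500_', '._AC_SX1000_'),
--     ]
--
--     for old_param, new_param in replacements:
--         enhanced_url = enhanced_url.replace(old_param, new_param)
--
--     if '._AC_' not in enhanced_url and '._SY' not in enhanced_url and '._SX' not in enhanced_url:
--         if '.jpg' in enhanced_url:
--             enhanced_url = enhanced_url.replace('.jpg', '._AC_SY1000_.jpg')
--         elif '.jpeg' in enhanced_url: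
--             enhanced_url = enhanced_url.replace('.jpeg', '._AC_SY1000_.jpeg')
--         elif '.png' in enhanced_url:
--             enhanced_url = enhanced_url.replace('.png', '._AC_SY1000_.png')
--
--     return enhanced_url
-- ===== SOURCE B (Python) =====
-- # Single left-to-right scan replacing known Amazon size tokens (vs A's 24 sequential full-string .replace passes).
--
-- SIZE_MAP = {
--     '._AC_UY218_': '._AC_UY1000_',
--     '._AC_UX218_': '._AC_UX1000_',
--     '._AC_UY200_': '._AC_UY1000_',
--     '._AC_UX200_': '._AC_UX1000_',
--     '._AC_UY400_': '._AC_UY1000_',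
--     '._AC_UX400_': '._AC_UX1000_',
--     '._AC_UY500_': '._AC_UY1000_',
--     '._AC_UX500_': '._AC_UX1000_',
--     '._SY160_': '._SY1000_',
--     '._SX160_': '._SX1000_',
--     '._SY200_': '._SY1000_',
--     '._SX200_': '._SX1000_',
--     '._SY300_': '._SY1000_',
--     '._SX300_': '._SX1000_',
--     '._SY400_': '._SY1000_',
--     '._SX400_': '._SX1000_',
--     '._SY500_': '._SY1000_',
--     '._SX500_': '._SX1000_',
--     '._AC_SY200_': '._AC_SY1000_',
--     '._AC_SX200_': '._AC_SX1000_',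
--     '._AC_SY400_': '._AC_SY1000_',
--     '._AC_SX400_': '._AC_SX1000_',
--     '._AC_SY500_': '._AC_SY1000_',
--     '._AC_SX500_': '._AC_SX1000_',
-- }
--
--
-- def enhance_image_quality(image_url: str) -> str:
--     """Enhance image quality by modifying Amazon image URL parameters (single-pass scan)."""
--     if not image_url:
--         return image_url
--
--     out = []
--     i = 0
--     n = len(image_url)
--     while i < n:
--         c = image_url[i]
--         if c == '.':
--             for old, new in SIZE_MAP.items():
--                 if image_url.startswith(old, i):
--                     out.append(new)
--                     i += len(old)
--                     break
--             else:
--                 out.append(c)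
--                 i += 1
--         else:
--             out.append(c)
--             i += 1
--     enhanced = ''.join(out)
--
--     if '._AC_' not in enhanced and '._SY' not in enhanced and '._SX' not in enhanced:
--         if '.jpg' in enhanced:
--             enhanced = enhanced.replace('.jpg', '._AC_SY1000_.jpg')
--         elif '.jpeg' in enhanced:
--             enhanced = enhanced.replace('.jpeg', '._AC_SY1000_.jpeg')
--         elif '.png' in enhanced:
--             enhanced = enhanced.replace('.png', '._AC_SY1000_.png')
--
--     return enhanced
-- ===== Notes on version B (the rewrite author's own statement) =====
-- stated objective: alternative
-- what changed: A rewrites the URL with 24 sequential full-string str.replace passes, one per size token; B makes a single left-to-right scan that at each candidate start position looks the token up in the precomputed old-to-new map and emits the replacement (or the current character), then applies the same fallback block.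
import Mathlib
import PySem

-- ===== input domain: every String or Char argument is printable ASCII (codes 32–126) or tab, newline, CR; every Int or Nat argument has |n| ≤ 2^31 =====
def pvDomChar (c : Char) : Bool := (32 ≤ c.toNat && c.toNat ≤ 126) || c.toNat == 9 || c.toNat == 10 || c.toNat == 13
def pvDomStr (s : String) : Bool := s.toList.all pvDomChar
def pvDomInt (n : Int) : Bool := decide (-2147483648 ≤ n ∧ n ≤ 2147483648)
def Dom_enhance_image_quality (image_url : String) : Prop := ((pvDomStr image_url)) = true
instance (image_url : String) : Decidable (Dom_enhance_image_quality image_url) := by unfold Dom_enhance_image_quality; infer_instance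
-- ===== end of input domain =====

-- B replaces A's 24 sequential full-string replace passes by one left-to-right scan that looks the
-- size token up at each candidate start position; same return value, different algorithm (objective: alternative).

-- ===== PORT A =====
def pvReplacements : List (String × String) := [
  ("._AC_UY218_", "._AC_UY1000_"),
  ("._AC_UX218_", "._AC_UX1000_"),
  ("._AC_UY200_", "._AC_UY1000_"),
  ("._AC_UX200_", "._AC_UX1000_"),
  ("._AC_UY400_", "._AC_UY1000_"),
  ("._AC_UX400_", "._AC_UX1000_"),
  ("._AC_UY500_", "._AC_UY1000_"),
  ("._AC_UX500_", "._AC_UX1000_"),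
  ("._SY160_", "._SY1000_"),
  ("._SX160_", "._SX1000_"),
  ("._SY200_", "._SY1000_"),
  ("._SX200_", "._SX1000_"),
  ("._SY300_", "._SY1000_"),
  ("._SX300_", "._SX1000_"),
  ("._SY400_", "._SY1000_"),
  ("._SX400_", "._SX1000_"),
  ("._SY500_", "._SY1000_"),
  ("._SX500_", "._SX1000_"),
  ("._AC_SY200_", "._AC_SY1000_"),
  ("._AC_SX200_", "._AC_SX1000_"),
  ("._AC_SY400_", "._AC_SY1000_"),
  ("._AC_SX400_", "._AC_SX1000_"),
  ("._AC_SY500_", "._AC_SY1000_"),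
  ("._AC_SX500_", "._AC_SX1000_")]

def enhance_image_quality (image_url : String) : String :=
  if image_url = "" then image_url
  else
    -- for old_param, new_param in replacements: enhanced_url = enhanced_url.replace(old_param, new_param)
    let enhanced := pvReplacements.foldl (fun acc p => PySem.Str.replace acc p.1 p.2) image_url
    if !PySem.Str.isIn "._AC_" enhanced && !PySem.Str.isIn "._SY" enhanced && !PySem.Str.isIn "._SX" enhanced then
      if PySem.Str.isIn ".jpg" enhanced then PySem.Str.replace enhanced ".jpg" "._AC_SY1000_.jpg"
      else if PySem.Str.isIn ".jpeg" enhanced then PySem.Str.replace enhanced ".jpeg" "._AC_SY1000_.jpeg"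
      else if PySem.Str.isIn ".png" enhanced then PySem.Str.replace enhanced ".png" "._AC_SY1000_.png"
      else enhanced
    else enhanced

-- ===== PORT B =====
-- B's SIZE_MAP dict holds the same 24 (old, new) literal pairs as A's replacements list,
-- here as (key chars, value chars) pairs in insertion order
def pvToks : List (List Char × List Char) := pvReplacements.map (fun p => (p.1.toList, p.2.toList))

theorem pvToks_key_pos : ∀ q ∈ pvToks, 0 < q.1.length := by decide

-- the while loop of B: at each position, if the char is a dot, try the keys in dict order
-- (image_url.startswith(old, i)); on a hit emit the value and jump by len(old), else emit the char
def pvScan (l : List Char) : List Char :=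
  match l with
  | [] => []
  | c :: t =>
    if c = '.' then
      match _h : pvToks.find? (fun q => q.1.isPrefixOf (c :: t)) with
      | some q => q.2 ++ pvScan (List.drop q.1.length (c :: t))
      | none => c :: pvScan t
    else c :: pvScan t
termination_by l.length
decreasing_by
  · have hmem := List.mem_of_find?_eq_some _h
    have := pvToks_key_pos q hmem
    simp [List.length_drop]; omega
  · simp
  · simp

def enhance_image_quality_alt (image_url : String) : String :=
  if image_url = "" then image_url
  else
    let enhanced := String.ofList (pvScan image_url.toList)
    if !PySem.Str.isIn "._AC_" enhanced && !PySem.Str.isIn "._SY" enhanced && !PySem.Str.isIn "._SX" enhanced then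
      if PySem.Str.isIn ".jpg" enhanced then PySem.Str.replace enhanced ".jpg" "._AC_SY1000_.jpg"
      else if PySem.Str.isIn ".jpeg" enhanced then PySem.Str.replace enhanced ".jpeg" "._AC_SY1000_.jpeg"
      else if PySem.Str.isIn ".png" enhanced then PySem.Str.replace enhanced ".png" "._AC_SY1000_.png"
      else enhanced
    else enhanced

-- ===== PRECONDITION & SPEC =====
def Spec_enhance_image_quality (image_url : String) (out : String) : Prop := out = enhance_image_quality_alt image_url
instance (image_url : String) (out : String) : Decidable (Spec_enhance_image_quality image_url out) := by unfold Spec_enhance_image_quality; infer_instance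

-- ===== CLAIM (what is proved, stated in full; the proofs are below) =====
def Claim_equal_enhance_image_quality : Prop := ∀ (image_url : String), Dom_enhance_image_quality image_url → Spec_enhance_image_quality image_url (enhance_image_quality image_url)

-- ===== LEMMAS AND PROOFS =====

-- clean (accumulator-free) form of Python str.replace for a nonempty pattern
def pvRep (old new : List Char) (l : List Char) : List Char :=
  match l with
  | [] => []
  | c :: t =>
    if old.isPrefixOf (c :: t) then new ++ pvRep old new (List.drop (max old.length 1) (c :: t))
    else c :: pvRep old new t
termination_by l.length
decreasing_by
  · simp [List.length_drop]
  · simp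

theorem pvRep_nil (old new : List Char) : pvRep old new [] = [] := by
  simp [pvRep]

theorem pvRep_cons_pos {old : List Char} (new : List Char) {c : Char} {t : List Char}
    (h : old.isPrefixOf (c :: t) = true) :
    pvRep old new (c :: t) = new ++ pvRep old new (List.drop (max old.length 1) (c :: t)) := by
  rw [pvRep]; simp [h]

theorem pvRep_cons_neg {old : List Char} (new : List Char) {c : Char} {t : List Char}
    (h : ¬ old.isPrefixOf (c :: t) = true) :
    pvRep old new (c :: t) = c :: pvRep old new t := by
  rw [pvRep]; simp [h]

-- PySem.Chars.replace.go with enough fuel is pvRep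
theorem pvGo_eq (old new : List Char) (hold : old ≠ []) : ∀ (fuel : Nat) (l acc : List Char),
    l.length ≤ fuel → PySem.Chars.replace.go old new fuel l acc = acc.reverse ++ pvRep old new l := by
  have hlen : 0 < old.length := List.length_pos_iff.mpr hold
  intro fuel
  induction fuel with
  | zero =>
    intro l acc hl
    have : l = [] := List.eq_nil_of_length_eq_zero (Nat.le_zero.mp hl)
    subst this
    simp [PySem.Chars.replace.go, pvRep_nil]
  | succ fuel ih =>
    intro l acc hl
    cases l with
    | nil => simp [PySem.Chars.replace.go, pvRep_nil]
    | cons c t =>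
      by_cases hp : old.isPrefixOf (c :: t) = true
      · rw [PySem.Chars.replace.go]
        simp only [hp, if_pos]
        rw [ih (List.drop old.length (c :: t)) (new.reverse ++ acc)
            (by simp [List.length_drop] at *; omega)]
        rw [pvRep_cons_pos new hp]
        have hmax : max old.length 1 = old.length := by omega
        simp [hmax]
      · rw [PySem.Chars.replace.go]
        simp only [hp]
        rw [ih t (c :: acc) (by simp at hl; omega)]
        rw [pvRep_cons_neg new hp]
        simp

theorem pvReplace_eq_rep (old new l : List Char) (h : old ≠ []) :
    PySem.Chars.replace l old new = pvRep old new l := by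
  rw [PySem.Chars.replace]
  have : old.isEmpty = false := by simpa [List.isEmpty_iff]
  rw [this]
  simp only [Bool.false_eq_true, if_false]
  rw [pvGo_eq old new h l.length l [] (le_refl _)]
  simp

-- table facts about the 24 token pairs -------------------------------------------------
-- key/value nonempty, starting with '.', and '.'-free after position 0
def pvDotOnly0 (l : List Char) : Bool := l.head? == some '.' && l.tail.all (· ≠ '.')
-- o and p disagree at some position inside both
def pvMis (o p : List Char) : Bool := (List.range (min o.length p.length)).any (fun j => o[j]? != p[j]?)

theorem pvTable_shape : ∀ q ∈ pvToks, pvDotOnly0 q.1 = true ∧ pvDotOnly0 q.2 = true := by decide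

theorem pvTable_mis : ∀ q ∈ pvToks, ∀ r ∈ pvToks,
    (q.1 ≠ r.1 → pvMis q.1 r.1 = true) ∧ pvMis q.1 r.2 = true := by decide

-- consequences ---------------------------------------------------------------------------
theorem pv_not_prefix_of_mis {o p : List Char} (hm : pvMis o p = true) (u : List Char) :
    ¬ o <+: (p ++ u) := by
  intro hpre
  simp only [pvMis, List.any_eq_true, List.mem_range] at hm
  obtain ⟨j, hj, hne⟩ := hm
  have hjo : j < o.length := lt_of_lt_of_le hj (Nat.min_le_left _ _)
  have hjp : j < p.length := lt_of_lt_of_le hj (Nat.min_le_right _ _)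
  obtain ⟨w, hw⟩ := hpre
  have h1 : (p ++ u)[j]? = o[j]? := by
    rw [← hw, List.getElem?_append_left hjo]
  rw [List.getElem?_append_left hjp] at h1
  simp [h1] at hne

theorem pvDotOnly0_ne {p : List Char} (hp : pvDotOnly0 p = true) {j : Nat} (h0 : 0 < j)
    (hj : j < p.length) : p[j]? ≠ some '.' := by
  simp only [pvDotOnly0, Bool.and_eq_true, beq_iff_eq, List.all_eq_true] at hp
  obtain ⟨-, htail⟩ := hp
  obtain ⟨j, rfl⟩ := Nat.exists_eq_add_of_lt h0
  simp only [Nat.zero_add] at *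
  have hjt : j < p.tail.length := by
    cases p <;> simp_all
  have := htail p.tail[j] (List.getElem_mem hjt)
  intro hcontra
  rw [← List.getElem?_tail] at hcontra
  rw [List.getElem?_eq_getElem hjt] at hcontra
  simp_all

theorem pvDotOnly0_head {p : List Char} (hp : pvDotOnly0 p = true) : p.head? = some '.' := by
  simp only [pvDotOnly0, Bool.and_eq_true, beq_iff_eq] at hp
  exact hp.1

theorem pv_nomatch_all {o p : List Char} (ho : pvDotOnly0 o = true) (hp : pvDotOnly0 p = true)
    (hm : pvMis o p = true) (u : List Char) : ∀ j < p.length, ¬ o <+: (p ++ u).drop j := by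
  intro j hj
  rcases Nat.eq_zero_or_pos j with rfl | h0
  · simpa using pv_not_prefix_of_mis hm u
  · rw [List.drop_append_of_le_length (le_of_lt hj)]
    intro hpre
    have hohead := pvDotOnly0_head ho
    have holen : 0 < o.length := by cases o <;> simp_all
    obtain ⟨w, hw⟩ := hpre
    have h1 : (p.drop j ++ u)[0]? = o[0]? := by
      rw [← hw, List.getElem?_append_left holen]
    have hdlen : 0 < (p.drop j).length := by simp [List.length_drop]; omega
    rw [List.getElem?_append_left hdlen] at h1
    rw [List.getElem?_drop] at h1
    have h2 : o[0]? = some '.' := by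
      cases o <;> simp_all
    rw [h2] at h1
    simp only [Nat.add_zero] at h1
    exact pvDotOnly0_ne hp h0 hj h1

theorem pvRep_append_of_nomatch (old new : List Char) : ∀ (p u : List Char),
    (∀ j < p.length, ¬ old <+: (p ++ u).drop j) → pvRep old new (p ++ u) = p ++ pvRep old new u := by
  intro p
  induction p with
  | nil => intro u _; simp
  | cons c p' ih =>
    intro u h
    have h0 : ¬ old <+: (c :: (p' ++ u)) := by
      simpa using h 0 (by simp)
    have hnp : ¬ old.isPrefixOf (c :: (p' ++ u)) = true := by
      rw [List.isPrefixOf_iff_prefix]; exact h0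
    rw [List.cons_append, pvRep_cons_neg new hnp]
    rw [ih u (fun j hj => by
      have := h (j + 1) (by simp; omega)
      simpa using this)]
    rfl

theorem pvRep_token_prefix (o n : List Char) (ho : o ≠ []) (u : List Char) :
    pvRep o n (o ++ u) = n ++ pvRep o n u := by
  cases o with
  | nil => exact absurd rfl ho
  | cons c o' =>
    have hp : (c :: o').isPrefixOf (c :: o' ++ u) = true := by
      rw [List.isPrefixOf_iff_prefix]
      exact ⟨u, rfl⟩
    rw [List.cons_append, pvRep_cons_pos n (by simp only [List.cons_append] at hp; exact hp)]
    have hmax : max (c :: o').length 1 = (c :: o').length := by simp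
    rw [hmax]
    congr 1
    have : List.drop (c :: o').length (c :: o' ++ u) = u := List.drop_left
    simp only [List.cons_append] at this
    rw [this]

-- a '.'-free string that is not a prefix stays not a prefix through pvRep
theorem pvRep_no_prefix_dotfree (o' n' : List Char)
    (hn' : pvDotOnly0 n' = true) : ∀ (N : Nat) (l q : List Char), l.length ≤ N →
    q.all (· ≠ '.') = true → ¬ q <+: l → ¬ q <+: pvRep o' n' l := by
  intro N
  induction N with
  | zero =>
    intro l q hl hq hnp
    have : l = [] := List.eq_nil_of_length_eq_zero (Nat.le_zero.mp hl)
    subst this; rw [pvRep_nil]; exact hnp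
  | succ N ih =>
    intro l q hl hq hnp
    cases l with
    | nil => rw [pvRep_nil]; exact hnp
    | cons c t =>
      have hqne : q ≠ [] := by rintro rfl; exact hnp (List.nil_prefix)
      obtain ⟨q0, q', rfl⟩ := List.exists_cons_of_ne_nil hqne
      have hqc := hq
      simp only [List.all_cons, Bool.and_eq_true] at hqc
      have hq0 : q0 ≠ '.' := by simpa using hqc.1
      by_cases hp : o'.isPrefixOf (c :: t) = true
      · rw [pvRep_cons_pos n' hp]
        intro hpre
        obtain ⟨w, hw⟩ := hpre
        have hn'len : 0 < n'.length := by
          have := pvDotOnly0_head hn'; cases n' <;> simp_all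
        have h2 : n'[0]? = some '.' := by
          have := pvDotOnly0_head hn'; cases n' <;> simp_all
        have h1 := congrArg (fun l => l[0]?) hw
        simp only [List.cons_append, List.getElem?_cons_zero] at h1
        rw [List.getElem?_append_left hn'len, h2] at h1
        exact hq0 (Option.some.inj h1)
      · rw [pvRep_cons_neg n' hp]
        intro hpre
        rw [List.cons_prefix_cons] at hpre
        obtain ⟨rfl, hpre'⟩ := hpre
        have hnp' : ¬ q' <+: t := by
          intro hc; exact hnp (List.cons_prefix_cons.mpr ⟨rfl, hc⟩)
        exact ih t q' (by simp at hl; omega) hqc.2 hnp' hpre'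

-- a token that is not a prefix stays not a prefix through pvRep
theorem pvRep_no_prefix_tok (o' n' o : List Char)
    (hn' : pvDotOnly0 n' = true) (ho : pvDotOnly0 o = true) (hm : pvMis o n' = true) :
    ∀ (N : Nat) (l : List Char), l.length ≤ N → ¬ o <+: l → ¬ o <+: pvRep o' n' l := by
  intro N l hl hnp
  cases l with
  | nil => rw [pvRep_nil]; exact hnp
  | cons c t =>
    by_cases hp : o'.isPrefixOf (c :: t) = true
    · rw [pvRep_cons_pos n' hp]
      exact pv_not_prefix_of_mis hm _
    · rw [pvRep_cons_neg n' hp]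
      intro hpre
      obtain ⟨o0, o'', rfl⟩ : ∃ a b, o = a :: b := by
        cases o with
        | nil => have := pvDotOnly0_head ho; simp at this
        | cons a b => exact ⟨a, b, rfl⟩
      have ho0 : o0 = '.' := by
        have := pvDotOnly0_head ho; simp_all
      rw [List.cons_prefix_cons] at hpre
      obtain ⟨rfl, hpre'⟩ := hpre
      have hnp' : ¬ o'' <+: t := by
        intro hc; exact hnp (List.cons_prefix_cons.mpr ⟨rfl, hc⟩)
      have ho'' : o''.all (· ≠ '.') = true := by
        subst ho0
        simp only [pvDotOnly0, Bool.and_eq_true] at ho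
        simpa using ho.2
      have hN : t.length ≤ t.length := le_refl _
      exact pvRep_no_prefix_dotfree o' n' hn' t.length t o'' hN ho'' hnp' hpre'

-- the fold of pvRep over a token list ----------------------------------------------------
def pvSeqF (ts : List (List Char × List Char)) (l : List Char) : List Char :=
  ts.foldl (fun acc q => pvRep q.1 q.2 acc) l

theorem pvSeqF_nil (ts : List (List Char × List Char)) : pvSeqF ts [] = [] := by
  induction ts with
  | nil => rfl
  | cons q ts ih => simp only [pvSeqF, List.foldl_cons, pvRep_nil] at *; exact ih

theorem pvFold_pre (o : List Char) (ho : pvDotOnly0 o = true) :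
    ∀ (ts : List (List Char × List Char)), (∀ q ∈ ts, q ∈ pvToks) → (∀ q ∈ ts, pvMis q.1 o = true) →
    ∀ u, pvSeqF ts (o ++ u) = o ++ pvSeqF ts u := by
  intro ts
  induction ts with
  | nil => intro _ _ u; rfl
  | cons q ts ih =>
    intro hmem hmis u
    have hq := pvTable_shape q (hmem q (by simp))
    have hstep : pvRep q.1 q.2 (o ++ u) = o ++ pvRep q.1 q.2 u :=
      pvRep_append_of_nomatch q.1 q.2 o u (pv_nomatch_all hq.1 ho (hmis q (by simp)) u)
    simp only [pvSeqF, List.foldl_cons] at *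
    rw [hstep]
    exact ih (fun r hr => hmem r (by simp [hr])) (fun r hr => hmis r (by simp [hr])) (pvRep q.1 q.2 u)

theorem pvFold_post (n : List Char) (hn : pvDotOnly0 n = true)
    (hmis : ∀ q ∈ pvToks, pvMis q.1 n = true) :
    ∀ (ts : List (List Char × List Char)), (∀ q ∈ ts, q ∈ pvToks) →
    ∀ v, pvSeqF ts (n ++ v) = n ++ pvSeqF ts v := by
  intro ts
  induction ts with
  | nil => intro _ v; rfl
  | cons q ts ih =>
    intro hmem v
    have hqmem := hmem q (by simp)
    have hq := pvTable_shape q hqmem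
    have hstep : pvRep q.1 q.2 (n ++ v) = n ++ pvRep q.1 q.2 v :=
      pvRep_append_of_nomatch q.1 q.2 n v (pv_nomatch_all hq.1 hn (hmis q hqmem) v)
    simp only [pvSeqF, List.foldl_cons] at *
    rw [hstep]
    exact ih (fun r hr => hmem r (by simp [hr])) (pvRep q.1 q.2 v)

theorem pvFold_cons (c : Char) :
    ∀ (ts : List (List Char × List Char)), (∀ q ∈ ts, q ∈ pvToks) →
    ∀ (t : List Char), (∀ q ∈ pvToks, ¬ q.1 <+: (c :: t)) →
    pvSeqF ts (c :: t) = c :: pvSeqF ts t ∧ ∀ q ∈ pvToks, ¬ q.1 <+: (c :: pvSeqF ts t) := by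
  intro ts
  induction ts with
  | nil => intro _ t h; exact ⟨rfl, h⟩
  | cons q ts ih =>
    intro hmem t h
    have hqmem := hmem q (by simp)
    have hq := pvTable_shape q hqmem
    have hnp : ¬ q.1.isPrefixOf (c :: t) = true := by
      rw [List.isPrefixOf_iff_prefix]; exact h q hqmem
    have hstep : pvRep q.1 q.2 (c :: t) = c :: pvRep q.1 q.2 t := pvRep_cons_neg q.2 hnp
    have hnew : ∀ r ∈ pvToks, ¬ r.1 <+: (c :: pvRep q.1 q.2 t) := by
      intro r hr
      rw [← hstep]
      have hrq := pvTable_shape r hr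
      have hmis := (pvTable_mis r hr q hqmem).2
      exact pvRep_no_prefix_tok q.1 q.2 r.1 hq.2 hrq.1 hmis (c :: t).length (c :: t)
        (le_refl _) (h r hr)
    have := ih (fun r hr => hmem r (by simp [hr])) (pvRep q.1 q.2 t) hnew
    refine ⟨?_, this.2⟩
    simp only [pvSeqF, List.foldl_cons] at *
    rw [hstep, this.1]

theorem pvScan_nil : pvScan [] = [] := by rw [pvScan]

theorem pvScan_cons_ne {c : Char} (t : List Char) (hc : ¬ c = '.') :
    pvScan (c :: t) = c :: pvScan t := by
  rw [pvScan]; simp [hc]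

theorem pvScan_cons_dot_none (t : List Char)
    (h : pvToks.find? (fun q => q.1.isPrefixOf ('.' :: t)) = none) :
    pvScan ('.' :: t) = '.' :: pvScan t := by
  rw [pvScan]
  simp only [reduceIte]
  split <;> simp_all

theorem pvScan_cons_dot_some (t : List Char) (q : List Char × List Char)
    (h : pvToks.find? (fun q => q.1.isPrefixOf ('.' :: t)) = some q) :
    pvScan ('.' :: t) = q.2 ++ pvScan (List.drop q.1.length ('.' :: t)) := by
  rw [pvScan]
  simp only [reduceIte]
  split <;> simp_all

-- main: the 24-pass fold equals the single scan
theorem pvSeq_eq_scan : ∀ (N : Nat) (l : List Char), l.length ≤ N → pvSeqF pvToks l = pvScan l := by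
  intro N
  induction N with
  | zero =>
    intro l hl
    have : l = [] := List.eq_nil_of_length_eq_zero (Nat.le_zero.mp hl)
    subst this
    rw [pvSeqF_nil, pvScan_nil]
  | succ N ih =>
    intro l hl
    cases l with
    | nil => rw [pvSeqF_nil, pvScan_nil]
    | cons c t =>
      by_cases hc : c = '.'
      · subst hc
        cases hfind : pvToks.find? (fun q => q.1.isPrefixOf ('.' :: t)) with
        | none =>
          have hall : ∀ q ∈ pvToks, ¬ q.1 <+: ('.' :: t) := by
            intro q hq
            have := List.find?_eq_none.mp hfind q hq
            rw [← List.isPrefixOf_iff_prefix]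
            simpa using this
          have hfc := pvFold_cons '.' pvToks (fun q hq => hq) t hall
          rw [pvScan_cons_dot_none t hfind, hfc.1, ih t (by simp at hl; omega)]
        | some q =>
          obtain ⟨hpred, ts₁, ts₂, htoks, hfalse⟩ := List.find?_eq_some_iff_append.mp hfind
          have hqmem : q ∈ pvToks := List.mem_of_find?_eq_some hfind
          have hqshape := pvTable_shape q hqmem
          have hq1ne : q.1 ≠ [] := by
            have := pvDotOnly0_head hqshape.1; cases hq : q.1 <;> simp_all
          obtain ⟨u, hu⟩ : q.1 <+: ('.' :: t) := List.isPrefixOf_iff_prefix.mp hpred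
          have hdrop : List.drop q.1.length ('.' :: t) = u := by
            rw [← hu]; exact List.drop_left
          have hulen : u.length ≤ N := by
            have := congrArg List.length hu
            simp only [List.length_append, List.length_cons] at this
            have h1 : 0 < q.1.length := List.length_pos_iff.mpr hq1ne
            simp at hl; omega
          -- members of ts₁ / ts₂ are tokens
          have hmem₁ : ∀ r ∈ ts₁, r ∈ pvToks := by
            intro r hr; rw [htoks]; exact List.mem_append.mpr (Or.inl hr)
          have hmem₂ : ∀ r ∈ ts₂, r ∈ pvToks := by
            intro r hr; rw [htoks]; simp [hr]
          -- keys in ts₁ differ from q.1 (their prefix test failed)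
          have hmis₁ : ∀ r ∈ ts₁, pvMis r.1 q.1 = true := by
            intro r hr
            have hrt := hmem₁ r hr
            have hne : r.1 ≠ q.1 := by
              intro he
              have := hfalse r hr
              rw [he] at this
              simp [hpred] at this
            exact (pvTable_mis r hrt q hqmem).1 hne
          have hmisq2 : ∀ r ∈ pvToks, pvMis r.1 q.2 = true := by
            intro r hr; exact (pvTable_mis r hr q hqmem).2
          -- decompose the fold
          have hsplit : ∀ v, pvSeqF pvToks v = pvSeqF ts₂ (pvRep q.1 q.2 (pvSeqF ts₁ v)) := by
            intro v
            simp only [pvSeqF, htoks, List.foldl_append, List.foldl_cons]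
          rw [pvScan_cons_dot_some t q hfind, hdrop, ← ih u hulen]
          rw [hsplit ('.' :: t), ← hu]
          rw [pvFold_pre q.1 hqshape.1 ts₁ hmem₁ hmis₁ u]
          rw [pvRep_token_prefix q.1 q.2 hq1ne]
          rw [pvFold_post q.2 hqshape.2 hmisq2 ts₂ hmem₂]
          rw [hsplit u]
      · have hall : ∀ q ∈ pvToks, ¬ q.1 <+: (c :: t) := by
          intro q hq hpre
          have hhead := pvDotOnly0_head (pvTable_shape q hq).1
          obtain ⟨q0, q', hq1⟩ : ∃ a b, q.1 = a :: b := by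
            cases hq1 : q.1 with
            | nil => rw [hq1] at hhead; simp at hhead
            | cons a b => exact ⟨a, b, rfl⟩
          rw [hq1] at hhead hpre
          simp only [List.head?_cons, Option.some.injEq] at hhead
          rw [List.cons_prefix_cons] at hpre
          exact hc (hpre.1 ▸ hhead ▸ rfl)
        have hfc := pvFold_cons c pvToks (fun q hq => hq) t hall
        rw [pvScan_cons_ne t hc, hfc.1, ih t (by simp at hl; omega)]

-- string-level fold to char-level fold
theorem pvStrFold_eq : ∀ (ts : List (String × String)) (s : String),
    (ts.foldl (fun acc p => PySem.Str.replace acc p.1 p.2) s).toList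
      = (ts.map (fun p => (p.1.toList, p.2.toList))).foldl
          (fun acc q => PySem.Chars.replace acc q.1 q.2) s.toList := by
  intro ts
  induction ts with
  | nil => intro s; rfl
  | cons p ts ih =>
    intro s
    simp only [List.map_cons, List.foldl_cons]
    rw [ih (PySem.Str.replace s p.1 p.2)]
    congr 1
    simp [PySem.Str.replace]

theorem pvCharsFold_eq_seq : ∀ (ts : List (List Char × List Char)), (∀ q ∈ ts, q.1 ≠ []) →
    ∀ (l : List Char),
    ts.foldl (fun acc q => PySem.Chars.replace acc q.1 q.2) l = pvSeqF ts l := by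
  intro ts
  induction ts with
  | nil => intro _ _; rfl
  | cons q ts ih =>
    intro h l
    simp only [List.foldl_cons, pvSeqF]
    rw [pvReplace_eq_rep q.1 q.2 l (h q (by simp))]
    exact ih (fun r hr => h r (by simp [hr])) (pvRep q.1 q.2 l)

theorem pvToks_key_ne_nil : ∀ q ∈ pvToks, q.1 ≠ [] := by decide

-- string-level bridge
theorem pvEnhanced_eq (s : String) :
    (pvReplacements.foldl (fun acc p => PySem.Str.replace acc p.1 p.2) s).toList
      = pvScan s.toList := by
  rw [pvStrFold_eq]
  have hmap : pvReplacements.map (fun p => (p.1.toList, p.2.toList)) = pvToks := by decide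
  rw [hmap, pvCharsFold_eq_seq pvToks pvToks_key_ne_nil]
  exact pvSeq_eq_scan s.toList.length s.toList (le_refl _)

-- ===== VERDICT (by name: the statement is the Claim_ definition above) =====
theorem enhance_image_quality_spec : Claim_equal_enhance_image_quality := by
  unfold Claim_equal_enhance_image_quality
  intro s _
  unfold Spec_enhance_image_quality
  by_cases hs : s = ""
  · simp [enhance_image_quality, enhance_image_quality_alt, hs]
  · have hE : pvReplacements.foldl (fun acc p => PySem.Str.replace acc p.1 p.2) s
        = String.ofList (pvScan s.toList) := by
      have h := pvEnhanced_eq s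
      calc pvReplacements.foldl (fun acc p => PySem.Str.replace acc p.1 p.2) s
          = String.ofList (pvReplacements.foldl
              (fun acc p => PySem.Str.replace acc p.1 p.2) s).toList := by simp
        _ = String.ofList (pvScan s.toList) := by rw [h]
    simp only [enhance_image_quality, enhance_image_quality_alt, hs, if_false]
    rw [hE]
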